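-- pv_equiv track=rewrite | github.com/hatanakashumpei/emoji_slack_bot | emoji_bot/plugins.py | encodenewline
-- ===== SOURCE A (Python) =====
-- def encodenewline(text):
--     strings = text.split('_')
--     newstr = ''
--     for index in range(len(strings)):
--         if index != len(strings) - 1:
--             newstr += strings[index]
--             newstr += '\n'
--         else:
--             newstr += strings[index]
--     return newstr
-- ===== SOURCE B (Python) =====
-- def encodenewline(text):
--     return text.replace('_', '\n')
-- ===== Notes on version B (the rewrite author's own statement) =====
-- stated objective: simpler
-- what changed: Replaced the split-into-list plus index loop with last-element branching by a single built-in substitution text.replace('_', '\n').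
import Mathlib
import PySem

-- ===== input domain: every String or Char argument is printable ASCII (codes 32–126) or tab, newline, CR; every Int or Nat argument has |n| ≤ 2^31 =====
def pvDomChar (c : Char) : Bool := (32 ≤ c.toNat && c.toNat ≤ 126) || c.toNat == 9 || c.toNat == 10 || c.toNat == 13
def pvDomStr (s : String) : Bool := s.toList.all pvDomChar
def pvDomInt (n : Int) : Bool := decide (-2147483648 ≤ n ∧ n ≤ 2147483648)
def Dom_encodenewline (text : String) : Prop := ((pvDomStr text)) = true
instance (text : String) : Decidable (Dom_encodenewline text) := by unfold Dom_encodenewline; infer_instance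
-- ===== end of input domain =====

-- B replaces A's split-into-list plus index loop (with a last-element branch) by the single
-- built-in substitution text.replace('_', '\n'); same result, simpler.

-- ===== PORT A =====
-- text.split('_'): sep "_" is nonempty so split? is always `some`; the .getD [] default is never used.
-- strings[index]: index always in range inside the loop, so the .getD "" default is never used.
def encodenewline (text : String) : String :=
  let strings : List String := (PySem.Str.split? text "_").getD []
  (PySem.List.pyRange 0 (strings.length : Int)).foldl
    (fun newstr index =>
      if index ≠ (strings.length : Int) - 1 then
        (newstr ++ (PySem.List.pyGet? strings index).getD "") ++ "\n"
      else
        newstr ++ (PySem.List.pyGet? strings index).getD "") ""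

-- ===== PORT B =====
def encodenewline_alt (text : String) : String :=
  PySem.Str.replace text "_" "\n"

-- ===== PRECONDITION & SPEC =====
def Spec_encodenewline (text : String) (out : String) : Prop := out = encodenewline_alt text
instance (text : String) (out : String) : Decidable (Spec_encodenewline text out) := by unfold Spec_encodenewline; infer_instance

-- ===== CLAIM (what is proved, stated in full; the proofs are below) =====
def Claim_equal_encodenewline : Prop := ∀ (text : String), Dom_encodenewline text → Spec_encodenewline text (encodenewline text)

-- ===== LEMMAS AND PROOFS =====

-- the character substitution both programs realise
def pvSub (c : Char) : Char := if c = '_' then '\n' else c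

-- clean recursive form of text.split('_')
def pvSplit1 : List Char → List (List Char)
  | [] => [[]]
  | c :: t =>
    if c = '_' then [] :: pvSplit1 t
    else match pvSplit1 t with
      | [] => [[c]]
      | h :: r => (c :: h) :: r

-- clean recursive form of A's joining loop
def pvGlue : List String → String
  | [] => ""
  | [x] => x
  | x :: y :: r => x ++ "\n" ++ pvGlue (y :: r)

theorem pvSplit1_ne_nil (cs : List Char) : pvSplit1 cs ≠ [] := by
  cases cs with
  | nil => simp [pvSplit1]
  | cons c t =>
    simp only [pvSplit1]
    split
    · simp
    · cases h : pvSplit1 t <;> simp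

theorem pvReplace_go_eq (fuel : Nat) :
    ∀ (l acc : List Char), l.length ≤ fuel →
      PySem.Chars.replace.go ['_'] ['\n'] fuel l acc = acc.reverse ++ l.map pvSub := by
  induction fuel with
  | zero =>
    intro l acc h
    have : l = [] := List.eq_nil_of_length_eq_zero (Nat.le_zero.mp h)
    subst this; simp [PySem.Chars.replace.go]
  | succ n ih =>
    intro l acc h
    cases l with
    | nil => simp [PySem.Chars.replace.go]
    | cons c t =>
      simp only [PySem.Chars.replace.go]
      by_cases hc : c = '_'
      · subst hc
        rw [if_pos (by simp [List.isPrefixOf])]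
        simp only [List.length_cons] at h
        rw [ih _ _ (by simpa using Nat.le_of_succ_le_succ h)]
        simp [pvSub]
      · rw [if_neg (by simp [List.isPrefixOf]; exact fun q => hc q.symm)]
        simp only [List.length_cons] at h
        rw [ih _ _ (Nat.le_of_succ_le_succ h)]
        simp [pvSub, hc]

theorem pvReplace_eq (cs : List Char) :
    PySem.Chars.replace cs ['_'] ['\n'] = cs.map pvSub := by
  simp only [PySem.Chars.replace, List.isEmpty_cons, Bool.false_eq_true, if_false]
  exact pvReplace_go_eq cs.length cs [] (le_refl _)

theorem pvSplitOn_go_eq (fuel : Nat) :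
    ∀ (l cur : List Char) (acc : List (List Char)), l.length < fuel →
      PySem.Chars.splitOn.go ['_'] fuel l cur acc =
        acc.reverse ++ (pvSplit1 l).modifyHead (cur.reverse ++ ·) := by
  induction fuel with
  | zero => intro l cur acc h; omega
  | succ n ih =>
    intro l cur acc h
    cases l with
    | nil => simp [PySem.Chars.splitOn.go, pvSplit1]
    | cons c t =>
      simp only [PySem.Chars.splitOn.go]
      by_cases hc : c = '_'
      · subst hc
        rw [if_pos (by simp [List.isPrefixOf])]
        simp only [List.length_cons] at h
        rw [ih _ _ _ (by simpa using Nat.lt_of_succ_lt_succ h)]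
        simp [pvSplit1]
        cases hs : pvSplit1 t with
        | nil => exact absurd hs (pvSplit1_ne_nil t)
        | cons h r => simp
      · rw [if_neg (by simp [List.isPrefixOf]; exact fun q => hc q.symm)]
        simp only [List.length_cons] at h
        rw [ih _ _ _ (Nat.lt_of_succ_lt_succ h)]
        simp only [pvSplit1, if_neg hc]
        cases hs : pvSplit1 t with
        | nil => exact absurd hs (pvSplit1_ne_nil t)
        | cons h r => simp

theorem pvSplitOn_eq (cs : List Char) :
    PySem.Chars.splitOn cs ['_'] = pvSplit1 cs := by
  rw [PySem.Chars.splitOn, pvSplitOn_go_eq (cs.length + 1) cs [] [] (by omega)]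
  cases hs : pvSplit1 cs with
  | nil => exact absurd hs (pvSplit1_ne_nil cs)
  | cons h r => simp

theorem pvGlue_cons (x : String) (r : List String) :
    pvGlue (x :: r) = x ++ (if r = [] then "" else "\n" ++ pvGlue r) := by
  cases r with
  | nil => simp [pvGlue]
  | cons y s => simp [pvGlue, String.append_assoc]

theorem pvGlue_map_split1 (cs : List Char) :
    (pvGlue ((pvSplit1 cs).map String.ofList)).toList = cs.map pvSub := by
  induction cs with
  | nil => simp [pvSplit1, pvGlue]
  | cons c t ih =>
    by_cases hc : c = '_'
    · subst hc
      rw [show pvSplit1 ('_' :: t) = [] :: pvSplit1 t from by simp [pvSplit1]]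
      simp only [List.map_cons]
      rw [pvGlue_cons]
      have hne : (pvSplit1 t).map String.ofList ≠ [] := by
        simpa using pvSplit1_ne_nil t
      rw [if_neg hne]
      simp [String.toList_append, ih, pvSub]
    · simp only [pvSplit1, if_neg hc]
      cases hs : pvSplit1 t with
      | nil => exact absurd hs (pvSplit1_ne_nil t)
      | cons h r =>
        rw [hs] at ih
        simp only [List.map_cons]
        rw [pvGlue_cons]
        simp only [List.map_cons] at ih
        rw [pvGlue_cons] at ih
        simp only [String.toList_append] at ih ⊢
        simp only [pvSub, if_neg hc]
        simp at ih ⊢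
        exact ih

-- A's index loop over the split pieces computes pvGlue of the remaining suffix
theorem pvLoop_eq (xs : List String) :
    ∀ (i : Nat) (acc : String), i < xs.length →
      (PySem.List.pyRange (i : Int) (xs.length : Int)).foldl
        (fun newstr index =>
          if index ≠ (xs.length : Int) - 1 then
            (newstr ++ (PySem.List.pyGet? xs index).getD "") ++ "\n"
          else
            newstr ++ (PySem.List.pyGet? xs index).getD "") acc
        = acc ++ pvGlue (xs.drop i) := by
  intro i
  induction hn : xs.length - i generalizing i with
  | zero => intro acc h; omega
  | succ n ih =>
    intro acc h
    rw [PySem.List.pyRange_one_cons (by exact_mod_cast h)]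
    simp only [List.foldl_cons]
    rw [List.drop_eq_getElem_cons h]
    by_cases hlast : i = xs.length - 1
    · -- last index: no newline appended, range is exhausted
      have h1 : (i : Int) = (xs.length : Int) - 1 := by omega
      rw [if_neg (by simp [h1]), PySem.List.pyGet?_natCast]
      have h2 : ((i : Int) + 1) = (xs.length : Int) := by omega
      rw [h2]
      have : PySem.List.pyRange (xs.length : Int) (xs.length : Int) = [] := by
        simp [PySem.List.pyRange]
      rw [this]
      have hd : xs.drop (i + 1) = [] := by
        apply List.drop_eq_nil_of_le; omega
      simp [hd, List.getElem?_eq_getElem h, pvGlue]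
    · -- not last: append piece and newline, recurse
      rw [if_pos (by intro hq; apply hlast; omega), PySem.List.pyGet?_natCast]
      have hi1 : i + 1 < xs.length := by omega
      have : ((i : Int) + 1) = ((i + 1 : Nat) : Int) := by push_cast; ring
      rw [this, ih (i + 1) (by omega) _ hi1]
      have hd : xs.drop (i + 1) ≠ [] := by
        intro hq
        have := List.drop_eq_nil_iff.mp hq
        omega
      rw [pvGlue_cons, if_neg hd]
      simp [List.getElem?_eq_getElem h, String.append_assoc]

-- ===== VERDICT (by name: the statement is the Claim_ definition above) =====
theorem encodenewline_spec : Claim_equal_encodenewline := by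
  intro text _
  unfold Spec_encodenewline encodenewline encodenewline_alt
  rw [← String.toList_inj]
  have hsplit : (PySem.Str.split? text "_").getD []
      = (pvSplit1 text.toList).map String.ofList := by
    simp [PySem.Str.split?, PySem.Chars.split?, pvSplitOn_eq]
  simp only [hsplit]
  have hne : (pvSplit1 text.toList).map String.ofList ≠ [] := by
    simpa using pvSplit1_ne_nil text.toList
  have hlen : 0 < ((pvSplit1 text.toList).map String.ofList).length := by
    cases h : (pvSplit1 text.toList).map String.ofList with
    | nil => exact absurd h hne
    | cons a b => simp
  have := pvLoop_eq ((pvSplit1 text.toList).map String.ofList) 0 "" hlen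
  simp only [Int.natCast_zero] at this
  rw [this, String.empty_append, PySem.Str.toList_replace]
  have ho : ("_" : String).toList = ['_'] := by decide
  have hn : ("\n" : String).toList = ['\n'] := by decide
  rw [ho, hn, pvReplace_eq, List.drop_zero, pvGlue_map_split1]
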